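-- pv_equiv track=rewrite | github.com/rochaadouglas/Python | UFSC/introd-PO/matriz_multiplicada.py | retornaMult
-- ===== SOURCE A (Python) =====
-- def retornaMult(matriz):
--     tam = len(matriz)
--     ind_linha = 0
--     nova_matriz = []
--     while ind_linha < tam:
--         qtcoluna = len(matriz[ind_linha])
--         ind_coluna = 0
--         nova_linha = []
--         while ind_coluna < qtcoluna:
--             if ind_linha == ind_coluna:
--                 nova_linha.append(0)
--             else:
--                 nova_linha.append(matriz[ind_linha][ind_coluna] * 10)
--             ind_coluna += 1
--         nova_matriz.append(nova_linha)
--         ind_linha += 1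
--     return nova_matriz
-- ===== SOURCE B (Python) =====
-- def retornaMult(matriz):
--     # Recursive "peel first row and first column" decomposition: scale the head
--     # row (zeroing its first cell), recurse on the minor with the first column
--     # stripped (which shifts the diagonal to column 0), then re-attach the
--     # scaled first elements of the remaining rows.
--     if not matriz:
--         return []
--     cabeca, resto = matriz[0], matriz[1:]
--     prim = ([0] + [x * 10 for x in cabeca[1:]]) if cabeca else []
--     sub = retornaMult([linha[1:] for linha in resto])
--     return [prim] + [([linha[0] * 10] + s) if linha else s
--                      for linha, s in zip(resto, sub)]
-- ===== Notes on version B (the rewrite author's own statement) =====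
-- stated objective: alternative
-- what changed: Replaces A's index-driven nested while loops by an index-free recursion on the matrix structure: peel off the first row (scale it, zero its first cell) and the first column, recurse on the stripped minor where the diagonal has shifted to column 0, then re-attach the scaled first elements of the remaining rows.
import Mathlib
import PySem

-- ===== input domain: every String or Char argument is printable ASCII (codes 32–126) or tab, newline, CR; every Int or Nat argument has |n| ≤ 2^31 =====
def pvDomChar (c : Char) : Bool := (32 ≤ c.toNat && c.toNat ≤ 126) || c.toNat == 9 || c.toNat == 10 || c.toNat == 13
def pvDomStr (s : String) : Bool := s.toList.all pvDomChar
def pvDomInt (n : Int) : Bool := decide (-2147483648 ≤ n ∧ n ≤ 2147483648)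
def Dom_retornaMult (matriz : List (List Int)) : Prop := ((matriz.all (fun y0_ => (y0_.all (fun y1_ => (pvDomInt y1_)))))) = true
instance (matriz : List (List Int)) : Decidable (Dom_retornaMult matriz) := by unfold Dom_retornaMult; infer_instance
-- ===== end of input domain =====

-- B replaces A's index-driven nested while loops by an index-free recursion: peel the first
-- row and first column, recurse on the stripped minor (the diagonal shifts to column 0),
-- and re-attach the scaled first elements of the remaining rows (objective: alternative).

-- ===== PORT A =====
def retornaMult (matriz : List (List Int)) : List (List Int) :=
  let tam : Int := matriz.length
  (PySem.List.pyRange 0 tam 1).foldl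
    (fun nova_matriz ind_linha =>
      let linha := PySem.List.pyGetD matriz ind_linha []
      let qtcoluna : Int := linha.length
      let nova_linha := (PySem.List.pyRange 0 qtcoluna 1).foldl
        (fun nl ind_coluna =>
          if ind_linha == ind_coluna then nl ++ [(0 : Int)]
          else nl ++ [PySem.List.pyGetD linha ind_coluna 0 * 10]) []
      nova_matriz ++ [nova_linha]) []

-- ===== PORT B =====
-- Transliteration of Source B; the slice linha[1:] is List.drop 1 (exact for any list).
def retornaMult_alt (matriz : List (List Int)) : List (List Int) :=
  match matriz with
  | [] => []
  | cabeca :: resto =>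
    let prim : List Int :=
      match cabeca with
      | [] => []
      | _ :: cs => 0 :: cs.map (fun x => x * 10)
    let sub := retornaMult_alt (resto.map (fun linha => linha.drop 1))
    prim :: (resto.zip sub).map (fun p =>
      match p.1 with
      | [] => p.2
      | x :: _ => x * 10 :: p.2)
termination_by matriz.length
decreasing_by simp

-- ===== PRECONDITION & SPEC =====
def Spec_retornaMult (matriz : List (List Int)) (out : List (List Int)) : Prop := out = retornaMult_alt matriz
instance (matriz : List (List Int)) (out : List (List Int)) : Decidable (Spec_retornaMult matriz out) := by unfold Spec_retornaMult; infer_instance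

-- ===== CLAIM (what is proved, stated in full; the proofs are below) =====
def Claim_equal_retornaMult : Prop := ∀ (matriz : List (List Int)), Dom_retornaMult matriz → Spec_retornaMult matriz (retornaMult matriz)

-- ===== LEMMAS AND PROOFS =====

-- Common index-wise specification both ports are reduced to.
def pvSpec (matriz : List (List Int)) : List (List Int) :=
  matriz.mapIdx (fun i linha => linha.mapIdx (fun j x => if i = j then (0 : Int) else x * 10))

-- a mapIdx whose function ignores the index is a map
lemma mapIdx_const_idx {α β : Type} (f : α → β) (l : List α) :
    l.mapIdx (fun _ x => f x) = l.map f := by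
  induction l with
  | nil => rfl
  | cons a t ih => simp [List.mapIdx_cons, ih]

-- mapIdx after map fuses
lemma mapIdx_of_map {α β γ : Type} (g : α → β) (f : Nat → β → γ) (l : List α) :
    (l.map g).mapIdx f = l.mapIdx (fun i a => f i (g a)) := by
  induction l generalizing f with
  | nil => rfl
  | cons a t ih => simp [List.mapIdx_cons, ih]

-- mapIdx respects pointwise-equal functions
lemma mapIdx_congr' {α β : Type} (f g : Nat → α → β) (l : List α)
    (h : ∀ i a, f i a = g i a) : l.mapIdx f = l.mapIdx g := by
  induction l generalizing f g with
  | nil => rfl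
  | cons a t ih => simp [List.mapIdx_cons, h, ih (fun i => f (i+1)) (fun i => g (i+1)) (fun i a => h (i+1) a)]

-- zip of a list with its mapIdx image, recombined, is a mapIdx
lemma zip_mapIdx_map {α β γ : Type} (l : List α) (h : Nat → α → β) (k : α → β → γ) :
    (l.zip (l.mapIdx h)).map (fun p => k p.1 p.2)
      = l.mapIdx (fun i a => k a (h i a)) := by
  induction l generalizing h with
  | nil => rfl
  | cons a t ih => simp [List.mapIdx_cons, ih]

-- B's recursion computes pvSpec
lemma alt_eq_spec (matriz : List (List Int)) : retornaMult_alt matriz = pvSpec matriz := by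
  induction matriz using retornaMult_alt.induct with
  | case1 => rw [retornaMult_alt.eq_def]; rfl
  | case2 cabeca resto ih =>
    rw [retornaMult_alt.eq_def]
    rw [show (List.map (fun x => List.drop 1 x.1) resto.attach) = resto.map (fun linha => linha.drop 1) from by simp] at ih
    simp only []
    rw [ih]
    unfold pvSpec
    simp only [List.mapIdx_cons, mapIdx_of_map]
    congr 1
    · cases cabeca with
      | nil => rfl
      | cons x cs => simp [List.mapIdx_cons, mapIdx_const_idx]
    · refine Eq.trans (zip_mapIdx_map resto
          (fun i a => (List.drop 1 a).mapIdx (fun j x => if i = j then (0 : Int) else x * 10))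
          (fun a b => match a with | [] => b | x :: _ => x * 10 :: b)) ?_
      apply mapIdx_congr'
      intro i linha
      cases linha with
      | nil => rfl
      | cons x t =>
        simp only [List.drop_succ_cons, List.drop_zero, List.mapIdx_cons]
        refine congrArg₂ _ (by simp) ?_
        apply mapIdx_congr'
        intro j y
        simp

-- A's inner while-loop on row i computes that row of pvSpec
lemma row_eq (i : Nat) (linha : List Int) :
    (PySem.List.pyRange 0 (linha.length : Int) 1).foldl
      (fun nl ind_coluna =>
        if (i : Int) == ind_coluna then nl ++ [(0 : Int)]
        else nl ++ [PySem.List.pyGetD linha ind_coluna 0 * 10]) []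
    = linha.mapIdx (fun j x => if i = j then (0 : Int) else x * 10) := by
  have hfun : (fun (nl : List Int) (ind_coluna : Int) =>
      if (i : Int) == ind_coluna then nl ++ [(0 : Int)]
      else nl ++ [PySem.List.pyGetD linha ind_coluna 0 * 10])
      = (fun nl ind_coluna =>
          nl ++ [if (i : Int) == ind_coluna then (0 : Int)
                 else PySem.List.pyGetD linha ind_coluna 0 * 10]) := by
    funext nl j; split <;> rfl
  rw [hfun, PySem.List.foldl_append_singleton_eq_map]
  simp only [List.nil_append]
  apply List.ext_getElem
  · simp [PySem.List.length_pyRange_one]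
  · intro k hk1 hk2
    simp only [List.length_map, PySem.List.length_pyRange_one] at hk1
    have hk : k < linha.length := by omega
    rw [List.getElem_map, PySem.List.getElem_pyRange_one, List.getElem_mapIdx]
    have hget : PySem.List.pyGetD linha ((0 : Int) + k) 0 = linha[k] := by
      simp [PySem.List.pyGetD_natCast, List.getD, hk]
    by_cases hik : i = k
    · simp [hik]
    · have hb : ((i : Int) == (0 : Int) + k) = false := by
        simp only [beq_eq_false_iff_ne, ne_eq]; omega
      simp [hik, List.getElem?_eq_getElem hk]

-- A's outer while-loop computes pvSpec
lemma a_eq_spec (matriz : List (List Int)) : retornaMult matriz = pvSpec matriz := by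
  unfold retornaMult
  simp only [PySem.List.foldl_append_singleton_eq_map, List.nil_append]
  unfold pvSpec
  apply List.ext_getElem
  · simp [PySem.List.length_pyRange_one]
  · intro k hk1 hk2
    simp only [List.length_map, PySem.List.length_pyRange_one] at hk1
    have hk : k < matriz.length := by omega
    rw [List.getElem_map, PySem.List.getElem_pyRange_one, List.getElem_mapIdx]
    have hget : PySem.List.pyGetD matriz ((0 : Int) + k) [] = matriz[k] := by
      simp [PySem.List.pyGetD_natCast, List.getD, hk]
    simp only [hget]
    have := row_eq k (matriz[k])
    simpa using this

-- ===== VERDICT (by name: the statement is the Claim_ definition above) =====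
theorem retornaMult_spec : Claim_equal_retornaMult := by
  intro matriz _
  unfold Spec_retornaMult
  rw [a_eq_spec, alt_eq_spec]
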